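-- pv_equiv track=rewrite | github.com/dreamcomes-true/baekjoon | SWEA/D3/1289. 원재의 메모리 복구하기/원재의 메모리 복구하기.py | findLeastNumber
-- ===== SOURCE A (Python) =====
-- def findLeastNumber(original) :
--     # original = 0011
--     # now = 0000
--     now = '0'*len(original)
--     cnt = 0
--     for i in range(len(original)) :
--         if original[i] != now[i] :
--             cnt += 1
--             now = now[:i] + original[i]*(len(original)-i)
--     return cnt
-- ===== SOURCE B (Python) =====
-- def findLeastNumber(original):
--     # Single pass: count transitions between adjacent characters, with an
--     # implicit leading '0' (each transition costs one fill operation).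
--     cnt = 0
--     prev = '0'
--     for ch in original:
--         if ch != prev:
--             cnt += 1
--             prev = ch
--     return cnt
-- ===== Notes on version B (the rewrite author's own statement) =====
-- stated objective: faster
-- what changed: Replaced the loop that rebuilds the whole 'now' string on every mismatch with a single pass counting adjacent-character transitions starting from an implicit '0'.
import Mathlib
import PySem

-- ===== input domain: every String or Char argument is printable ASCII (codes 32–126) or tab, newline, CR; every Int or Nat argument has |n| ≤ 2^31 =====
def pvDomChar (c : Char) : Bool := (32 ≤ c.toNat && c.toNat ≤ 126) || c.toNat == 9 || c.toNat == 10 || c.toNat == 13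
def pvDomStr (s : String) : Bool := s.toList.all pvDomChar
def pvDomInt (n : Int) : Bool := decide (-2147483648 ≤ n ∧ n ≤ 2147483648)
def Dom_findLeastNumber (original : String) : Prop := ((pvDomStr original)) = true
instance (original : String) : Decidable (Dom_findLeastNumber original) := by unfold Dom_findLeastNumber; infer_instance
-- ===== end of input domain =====

-- B replaces A's quadratic rebuild-the-string loop by a single pass counting
-- adjacent-character transitions (previous char starting at '0'); faster (asymptotic).

-- ===== PORT A =====
-- one iteration of A's for-loop: state = (now, cnt)
def aStep (s : List Char) (st : List Char × Int) (i : Int) : List Char × Int :=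
  if PySem.List.pyGetD s i ' ' ≠ PySem.List.pyGetD st.1 i ' ' then
    (PySem.List.slice st.1 none (some i) ++
       List.replicate ((s.length : Int) - i).toNat (PySem.List.pyGetD s i ' '),
     st.2 + 1)
  else st

def findLeastNumber (original : String) : Int :=
  let s := original.toList
  (List.foldl (aStep s) (List.replicate s.length '0', 0)
      (PySem.List.pyRange 0 (s.length : Int) 1)).2

-- ===== PORT B =====
def bStep (st : Char × Int) (ch : Char) : Char × Int :=
  if ch ≠ st.1 then (ch, st.2 + 1) else st

def findLeastNumber_alt (original : String) : Int :=
  (original.toList.foldl bStep ('0', 0)).2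

-- ===== PRECONDITION & SPEC =====
def Spec_findLeastNumber (original : String) (out : Int) : Prop := out = findLeastNumber_alt original
instance (original : String) (out : Int) : Decidable (Spec_findLeastNumber original out) := by unfold Spec_findLeastNumber; infer_instance

-- ===== CLAIM (what is proved, stated in full; the proofs are below) =====
def Claim_equal_findLeastNumber : Prop := ∀ (original : String), Dom_findLeastNumber original → Spec_findLeastNumber original (findLeastNumber original)

-- ===== LEMMAS AND PROOFS =====

-- Invariant: after processing indices < k, A's `now` is s.take k ++ replicate (n-k) prev,
-- where prev is B's running previous character; then both folds agree on the count.
lemma main_inv (s : List Char) (k : Nat) (hk : k ≤ s.length) (prev : Char) (cnt : Int) :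
    (List.foldl (aStep s) (s.take k ++ List.replicate (s.length - k) prev, cnt)
        (PySem.List.pyRange (k : Int) (s.length : Int) 1)).2
      = (List.foldl bStep (prev, cnt) (s.drop k)).2 := by
  induction hn : s.length - k generalizing k prev cnt with
  | zero =>
    have hk' : k = s.length := by omega
    subst hk'
    rw [PySem.List.pyRange_one_eq_nil le_rfl]
    simp
  | succ m ih =>
    rw [← hn]
    have hlt : k < s.length := by omega
    have hcast : ((k : Int)) < (s.length : Int) := by exact_mod_cast hlt
    rw [PySem.List.pyRange_one_cons hcast]
    have hdrop : s.drop k = s[k] :: s.drop (k + 1) := List.drop_eq_getElem_cons hlt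
    have hgetS : PySem.List.pyGetD s (k : Int) ' ' = s[k] := by
      rw [PySem.List.pyGetD_eq_getElem s ' ' (by positivity) hcast]
      simp
    have hnowlen : (s.take k).length = k := by simp [Nat.min_eq_left hk]
    have hlen2 : (s.take k ++ List.replicate (s.length - k) prev).length = s.length := by
      simp [hnowlen]; omega
    have hgetNow : PySem.List.pyGetD (s.take k ++ List.replicate (s.length - k) prev) (k : Int) ' ' = prev := by
      rw [PySem.List.pyGetD_eq_getElem _ ' ' (by positivity) (by rw [hlen2]; exact hcast)]
      simp only [Int.toNat_natCast]
      rw [List.getElem_append_right (by omega)]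
      simp [hnowlen]
    have hslice : PySem.List.slice (s.take k ++ List.replicate (s.length - k) prev) none (some (k : Int)) = s.take k := by
      rw [PySem.List.slice_to_natCast]
      rw [List.take_append_of_le_length (by omega)]
      simp [Nat.min_eq_left hk]
    have htoNat : (((s.length : Int)) - (k : Int)).toNat = s.length - k := by omega
    have hstep : ∀ c0 : Int, aStep s (s.take k ++ List.replicate (s.length - k) prev, c0) (k : Int)
        = (if s[k] ≠ prev then (s.take k ++ List.replicate (s.length - k) s[k], c0 + 1)
           else (s.take k ++ List.replicate (s.length - k) prev, c0)) := by
      intro c0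
      unfold aStep
      rw [hgetS, hgetNow, hslice, htoNat]
    have hre : s.take k ++ List.replicate (s.length - k) s[k]
        = s.take (k+1) ++ List.replicate (s.length - (k+1)) s[k] := by
      have h2 : List.take (k+1) s = List.take k s ++ [s[k]] := by
        rw [List.take_add_one, List.getElem?_eq_getElem hlt]
        rfl
      have h1 : s.length - k = (s.length - (k+1)) + 1 := by omega
      rw [h2, h1, List.replicate_succ, List.append_assoc]
      rfl
    have hm : s.length - (k+1) = m := by omega
    by_cases hne : s[k] = prev
    · rw [List.foldl_cons, hstep, if_neg (by simp [hne]), hdrop, List.foldl_cons]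
      rw [show prev = s[k] from hne.symm, hre]
      have hih := ih (k+1) (by omega) s[k] cnt hm
      rw [hm] at *
      push_cast at hih ⊢
      rw [hih]
      simp [bStep, hne]
    · rw [List.foldl_cons, hstep, if_pos hne, hdrop, List.foldl_cons]
      rw [hre]
      have hih := ih (k+1) (by omega) s[k] (cnt+1) hm
      rw [hm] at *
      push_cast at hih ⊢
      rw [hih]
      simp [bStep, Ne.symm, hne]

-- ===== VERDICT (by name: the statement is the Claim_ definition above) =====
theorem findLeastNumber_spec : Claim_equal_findLeastNumber := by
  intro original _
  unfold Spec_findLeastNumber findLeastNumber findLeastNumber_alt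
  have h := main_inv original.toList 0 (Nat.zero_le _) '0' 0
  simpa using h
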